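-- pv_equiv track=rewrite | github.com/LeeKunHa/Algorithm | 프로그래머스/unrated/161989. 덧칠하기/덧칠하기.py | solution
-- ===== SOURCE A (Python) =====
-- def solution(n, m, section):
--     answer = 0
--     while section:
--         answer = answer+1
--         end = section[0]+m
--         count = 0
--         for i in section:
--             if i<end:
--                 count = count+1
--             else:
--                 break
--         section = section[count:]
--     return answer
-- ===== SOURCE B (Python) =====
-- def solution(n, m, section):
--     answer = 0
--     end = None
--     for s in section:
--         if end is None or s >= end:
--             answer += 1
--             end = s + m
--     return answer
-- ===== Notes on version B (the rewrite author's own statement) =====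
-- stated objective: faster
-- what changed: Replaced the while-loop that rescans and reslices the list each stroke with a single pass that tracks the current stroke's end in one variable.
import Mathlib
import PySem

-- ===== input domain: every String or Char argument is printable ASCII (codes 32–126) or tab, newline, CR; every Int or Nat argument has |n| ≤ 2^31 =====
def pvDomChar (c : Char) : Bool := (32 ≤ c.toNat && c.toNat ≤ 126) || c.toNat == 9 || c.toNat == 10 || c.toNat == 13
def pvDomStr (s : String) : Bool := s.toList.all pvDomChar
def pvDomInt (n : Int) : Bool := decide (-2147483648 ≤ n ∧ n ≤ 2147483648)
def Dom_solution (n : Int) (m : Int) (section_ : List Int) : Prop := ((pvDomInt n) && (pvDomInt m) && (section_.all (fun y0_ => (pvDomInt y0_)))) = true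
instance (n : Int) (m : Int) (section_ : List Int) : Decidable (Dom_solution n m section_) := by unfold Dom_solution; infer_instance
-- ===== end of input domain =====

-- B replaces A's quadratic rescan-and-reslice greedy with one linear pass tracking the current stroke end (measured faster).


-- ===== PORT A =====
-- A's while-loop: each iteration counts the prefix of elements < section[0]+m (for-loop with break)
-- and slices it off.  Fuel = list length bounds the iterations; under Pre_ (m > 0) each
-- iteration drops at least one element, so the fuel never runs out.
def solGoA (fuel : Nat) (m : Int) (answer : Int) (section_ : List Int) : Int :=
  match fuel, section_ with
  | 0, _ => answer
  | _ + 1, [] => answer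
  | fuel + 1, h :: t =>
      let end_ := h + m
      let count := ((h :: t).takeWhile (fun i => decide (i < end_))).length
      solGoA fuel m (answer + 1) ((h :: t).drop count)

def solution (n : Int) (m : Int) (section_ : List Int) : Int :=
  solGoA section_.length m 0 section_

-- ===== PORT B =====
-- one fold over the list; state = (answer, current stroke end or none)
def stepB (m : Int) (acc : Int × Option Int) (s : Int) : Int × Option Int :=
  match acc.2 with
  | none => (acc.1 + 1, some (s + m))
  | some e => if e ≤ s then (acc.1 + 1, some (s + m)) else acc

def solution_alt (n : Int) (m : Int) (section_ : List Int) : Int :=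
  (section_.foldl (stepB m) (0, none)).1

-- ===== PRECONDITION & SPEC =====
-- Pre_ excludes m ≤ 0 with a nonempty list: there A's while-loop never shrinks the list
-- (count stays 0) and the Python diverges, returning nothing.
def Pre_solution (n : Int) (m : Int) (section_ : List Int) : Prop := 0 < m ∨ section_ = []
instance (n : Int) (m : Int) (section_ : List Int) : Decidable (Pre_solution n m section_) := by unfold Pre_solution; infer_instance
def pvWitness_solution : Int × Int × List Int := (8, 4, [2, 4, 5, 9])
def Spec_solution (n : Int) (m : Int) (section_ : List Int) (out : Int) : Prop := out = solution_alt n m section_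
instance (n : Int) (m : Int) (section_ : List Int) (out : Int) : Decidable (Spec_solution n m section_ out) := by unfold Spec_solution; infer_instance

-- ===== CLAIM (what is proved, stated in full; the proofs are below) =====
def Claim_equal_solution : Prop := ∀ (n : Int) (m : Int) (section_ : List Int), Dom_solution n m section_ → Pre_solution n m section_ → Spec_solution n m section_ (solution n m section_)

-- ===== LEMMAS AND PROOFS =====

theorem drop_len_takeWhile (p : Int → Bool) (l : List Int) :
    l.drop (l.takeWhile p).length = l.dropWhile p := by
  induction l with
  | nil => rfl
  | cons h t ih =>
      by_cases hp : p h
      · simpa [List.takeWhile, List.dropWhile, hp] using ih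
      · simp [List.takeWhile, List.dropWhile, hp]

-- skipping elements below the current end leaves B's fold state unchanged
theorem foldB_dropWhile (m e : Int) (a : Int) (l : List Int) :
    l.foldl (stepB m) (a, some e) = (l.dropWhile (fun i => decide (i < e))).foldl (stepB m) (a, some e) := by
  induction l with
  | nil => rfl
  | cons h t ih =>
      by_cases hlt : h < e
      · simp [List.dropWhile, hlt, List.foldl, stepB, not_le.mpr hlt] at *
        exact ih
      · simp [List.dropWhile, hlt]

-- when the head (if any) is ≥ e, the states (a, some e) and (a, none) act identically
theorem foldB_some_none (m e a : Int) (l : List Int)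
    (h : ∀ x ∈ l.head?, e ≤ x) :
    (l.foldl (stepB m) (a, some e)).1 = (l.foldl (stepB m) (a, none)).1 := by
  cases l with
  | nil => rfl
  | cons x t =>
      have hx : e ≤ x := h x (by simp)
      simp [List.foldl, stepB, hx]

theorem head_dropWhile_ge (e : Int) (l : List Int) :
    ∀ x ∈ (l.dropWhile (fun i => decide (i < e))).head?, e ≤ x := by
  induction l with
  | nil => simp
  | cons h t ih =>
      by_cases hlt : h < e
      · simpa [List.dropWhile, hlt] using ih
      · simp [List.dropWhile, hlt]
        omega

theorem solGoA_eq_fold (m : Int) (hm : 0 < m) :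
    ∀ (fuel : Nat) (s : List Int) (a : Int), s.length ≤ fuel →
      solGoA fuel m a s = (s.foldl (stepB m) (a, none)).1 := by
  intro fuel
  induction fuel with
  | zero =>
      intro s a hle
      have : s = [] := by
        cases s with
        | nil => rfl
        | cons h t => simp at hle
      subst this; rfl
  | succ fuel ih =>
      intro s a hle
      cases s with
      | nil => rfl
      | cons h t =>
          have hh : h < h + m := by omega
          have hdrop :
              ((h :: t).drop (((h :: t).takeWhile (fun i => decide (i < h + m))).length))
                = (h :: t).dropWhile (fun i => decide (i < h + m)) := by
            exact drop_len_takeWhile _ _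
          have hdw : (h :: t).dropWhile (fun i => decide (i < h + m))
              = t.dropWhile (fun i => decide (i < h + m)) := by
            simp [List.dropWhile, hh]
          have hlen : (t.dropWhile (fun i => decide (i < h + m))).length ≤ fuel := by
            have := List.length_dropWhile_le (p := fun i => decide (i < h + m)) (l := t)
            simp at hle; omega
          calc solGoA (fuel + 1) m a (h :: t)
              = solGoA fuel m (a + 1) ((h :: t).drop (((h :: t).takeWhile (fun i => decide (i < h + m))).length)) := by
                simp [solGoA]
            _ = solGoA fuel m (a + 1) (t.dropWhile (fun i => decide (i < h + m))) := by
                rw [hdrop, hdw]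
            _ = ((t.dropWhile (fun i => decide (i < h + m))).foldl (stepB m) (a + 1, none)).1 := by
                exact ih _ _ hlen
            _ = ((t.dropWhile (fun i => decide (i < h + m))).foldl (stepB m) (a + 1, some (h + m))).1 := by
                exact (foldB_some_none m (h + m) (a + 1) _ (head_dropWhile_ge _ _)).symm
            _ = (t.foldl (stepB m) (a + 1, some (h + m))).1 := by
                rw [← foldB_dropWhile]
            _ = ((h :: t).foldl (stepB m) (a, none)).1 := by
                simp [List.foldl, stepB]

-- ===== VERDICT (by name: the statement is the Claim_ definition above) =====
theorem solution_spec : Claim_equal_solution := by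
  intro n m section_ _ hpre
  unfold Spec_solution solution solution_alt
  rcases hpre with hm | hnil
  · exact solGoA_eq_fold m hm section_.length section_ 0 le_rfl
  · subst hnil; rfl
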